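-- pv_equiv track=rewrite | github.com/Lorenzo-Wrublewski/Projeto_Inventario | @Parte 2/lib/single_record_entry.py | _index_marcelo
-- ===== SOURCE A (Python) =====
-- from typing import List, Dict, Optional, Tuple
--
-- def _index_marcelo(records_marcelo: List[Dict[str, str]]) -> Dict[Tuple[str, str], List[Dict[str, str]]]:
--     idx: Dict[Tuple[str, str], List[Dict[str, str]]] = {}
--     for r in records_marcelo:
--         mat = r.get("material_number", "").strip()
--         bin_ = r.get("storage_bin", "").strip()
--         if not mat or not bin_:
--             continue
--         key = (mat, bin_)
--         idx.setdefault(key, []).append(r)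
--     return idx
-- ===== SOURCE B (Python) =====
-- from typing import List, Dict, Optional, Tuple
--
-- def _key(r: Dict[str, str]) -> Optional[Tuple[str, str]]:
--     mat = r.get("material_number", "").strip()
--     bin_ = r.get("storage_bin", "").strip()
--     return (mat, bin_) if mat and bin_ else None
--
-- def _index_marcelo(records_marcelo: List[Dict[str, str]]) -> Dict[Tuple[str, str], List[Dict[str, str]]]:
--     idx: Dict[Tuple[str, str], List[Dict[str, str]]] = {}
--     for r in records_marcelo:
--         k = _key(r)
--         if k is not None and k not in idx:
--             idx[k] = [x for x in records_marcelo if _key(x) == k]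
--     return idx
-- ===== Notes on version B (the rewrite author's own statement) =====
-- stated objective: alternative
-- what changed: Instead of A's single pass that grows each group incrementally via setdefault/append, B scans the records and, at the first occurrence of each valid key (tested by membership in the result dict itself), builds that key's entire group in one comprehension scan of the whole list; key extraction is factored into a _key helper returning None for invalid records.
import Mathlib
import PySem

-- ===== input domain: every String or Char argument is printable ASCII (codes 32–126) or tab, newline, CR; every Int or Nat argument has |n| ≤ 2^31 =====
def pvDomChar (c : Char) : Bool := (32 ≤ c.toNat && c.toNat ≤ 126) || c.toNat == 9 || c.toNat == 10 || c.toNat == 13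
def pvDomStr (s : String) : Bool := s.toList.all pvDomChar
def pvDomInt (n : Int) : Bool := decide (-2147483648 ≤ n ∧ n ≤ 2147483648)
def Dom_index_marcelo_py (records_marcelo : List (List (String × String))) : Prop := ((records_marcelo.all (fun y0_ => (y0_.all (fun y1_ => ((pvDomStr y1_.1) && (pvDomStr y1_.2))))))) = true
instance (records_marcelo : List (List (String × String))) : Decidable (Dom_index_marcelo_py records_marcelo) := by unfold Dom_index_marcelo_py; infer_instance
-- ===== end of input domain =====

-- B replaces A's incremental setdefault/append dict accumulation by a first-occurrence scan
-- that builds each key's whole group in one comprehension pass over the list; objective: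
-- alternative, not faster.


-- ===== PORT A =====
-- A tuple-keyed dict is rendered as flattened (mat, bin, group) triples per the type convention.
def index_marcelo_py (records_marcelo : List (List (String × String))) :
    List (String × String × List (List (String × String))) :=
  let idx : PySem.Dict (String × String) (List (List (String × String))) :=
    records_marcelo.foldl (fun idx r =>
      let mat := PySem.Str.strip ((PySem.Dict.mk r).getD "material_number" "")
      let bin_ := PySem.Str.strip ((PySem.Dict.mk r).getD "storage_bin" "")
      if mat = "" ∨ bin_ = "" then idx
      else idx.modify (mat, bin_) [] (· ++ [r]))   -- idx.setdefault(key, []).append(r)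
      PySem.Dict.empty
  idx.items.map (fun p => (p.1.1, p.1.2, p.2))

-- ===== PORT B =====
-- Source B's _key helper: the (mat, bin) key of a record, or none when either stripped field is empty.
def pvKeyB (r : List (String × String)) : Option (String × String) :=
  let mat := PySem.Str.strip ((PySem.Dict.mk r).getD "material_number" "")
  let bin_ := PySem.Str.strip ((PySem.Dict.mk r).getD "storage_bin" "")
  if mat ≠ "" ∧ bin_ ≠ "" then some (mat, bin_) else none

def index_marcelo_py_alt (records_marcelo : List (List (String × String))) :
    List (String × String × List (List (String × String))) :=
  let idx : List ((String × String) × List (List (String × String))) :=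
    records_marcelo.foldl (fun idx r =>
      match pvKeyB r with
      | none => idx
      | some k =>
        if (idx.map (·.1)).contains k then idx   -- k in idx
        else idx ++ [(k, records_marcelo.filter (fun x => pvKeyB x == some k))]) []
  idx.map (fun p => (p.1.1, p.1.2, p.2))

-- ===== PRECONDITION & SPEC =====
def Spec_index_marcelo_py (records_marcelo : List (List (String × String))) (out : List (String × String × List (List (String × String)))) : Prop := out = index_marcelo_py_alt records_marcelo
instance (records_marcelo : List (List (String × String))) (out : List (String × String × List (List (String × String)))) : Decidable (Spec_index_marcelo_py records_marcelo out) := by unfold Spec_index_marcelo_py; infer_instance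

-- ===== CLAIM (what is proved, stated in full; the proofs are below) =====
def Claim_equal_index_marcelo_py : Prop := ∀ (records_marcelo : List (List (String × String))), Dom_index_marcelo_py records_marcelo → Spec_index_marcelo_py records_marcelo (index_marcelo_py records_marcelo)

-- ===== LEMMAS AND PROOFS =====

-- the key of a record, and validity (both stripped fields non-empty)
def pvKeyOf (r : List (String × String)) : String × String :=
  (PySem.Str.strip ((PySem.Dict.mk r).getD "material_number" ""),
   PySem.Str.strip ((PySem.Dict.mk r).getD "storage_bin" ""))

def pvValid (r : List (String × String)) : Bool :=
  decide (¬((pvKeyOf r).1 = "" ∨ (pvKeyOf r).2 = ""))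

-- the (key, record) pairs of the valid records, in order
def pvPairs (l : List (List (String × String))) : List ((String × String) × List (String × String)) :=
  (l.filter pvValid).map (fun r => (pvKeyOf r, r))

lemma keyB_eq (r : List (String × String)) :
    pvKeyB r = if pvValid r then some (pvKeyOf r) else none := by
  simp only [pvKeyB, pvValid, pvKeyOf]
  split_ifs <;> simp_all

-- A's loop body, phrased through pvValid/pvKeyOf
lemma stepA_eq : (fun (idx : PySem.Dict (String × String) (List (List (String × String)))) r =>
      let mat := PySem.Str.strip ((PySem.Dict.mk r).getD "material_number" "")
      let bin_ := PySem.Str.strip ((PySem.Dict.mk r).getD "storage_bin" "")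
      if mat = "" ∨ bin_ = "" then idx
      else idx.modify (mat, bin_) [] (· ++ [r]))
    = (fun idx r => if pvValid r then idx.modify (pvKeyOf r) [] (· ++ [r]) else idx) := by
  funext idx r
  split_ifs <;> simp_all [pvValid, pvKeyOf]

-- A's loop is the plain grouping loop over the valid (key, record) pairs
lemma foldA_eq (l : List (List (String × String)))
    (d : PySem.Dict (String × String) (List (List (String × String)))) :
    l.foldl (fun idx r => if pvValid r then idx.modify (pvKeyOf r) [] (· ++ [r]) else idx) d
    = (pvPairs l).foldl (fun d p => d.modify p.1 [] (· ++ [p.2])) d := by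
  induction l generalizing d with
  | nil => rfl
  | cons r t ih =>
    cases hv : pvValid r <;> simp [pvPairs, List.filter, hv, ih]

-- A's result characterised: first-occurrence key order, whole group per key
lemma A_char (l : List (List (String × String))) :
    index_marcelo_py l
    = (PySem.List.dedup ((pvPairs l).map (·.1))).map
        (fun k => (k.1, k.2, ((pvPairs l).filter (fun p => p.1 == k)).map (·.2))) := by
  simp only [index_marcelo_py]
  rw [stepA_eq, foldA_eq]
  have hnd : ((pvPairs l).foldl (fun d p => d.modify p.1 [] (· ++ [p.2]))
      (PySem.Dict.empty : PySem.Dict (String × String) (List (List (String × String))))).keys.Nodup := by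
    have := PySem.Dict.nodup_keys_foldl_modify_key (pvPairs l) Prod.fst []
      (fun _ p => (· ++ [p.2])) PySem.Dict.empty (by simp)
    simpa using this
  rw [PySem.Dict.items_eq_map_keys _ hnd []]
  have hkeys : ((pvPairs l).foldl (fun d p => d.modify p.1 [] (· ++ [p.2]))
      (PySem.Dict.empty : PySem.Dict (String × String) (List (List (String × String))))).keys
      = PySem.List.dedup ((pvPairs l).map (·.1)) := by
    have := PySem.Dict.keys_foldl_modify_key (pvPairs l) Prod.fst []
      (fun _ p => (· ++ [p.2])) (PySem.Dict.empty : PySem.Dict (String × String) (List (List (String × String))))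
    simpa [PySem.List.dedup, PySem.Set.ofList, PySem.Set.update] using this
  rw [hkeys, List.map_map]
  apply List.map_congr_left
  intro k _
  have := PySem.Dict.getD_foldl_modify_append (pvPairs l)
    (PySem.Dict.empty : PySem.Dict (String × String) (List (List (String × String)))) k
  simp [this]

-- B's comprehension group at key k is A's accumulated group at k
lemma group_eq (l : List (List (String × String))) (k : String × String) :
    l.filter (fun x => pvKeyB x == some k)
    = ((pvPairs l).filter (fun p => p.1 == k)).map (·.2) := by
  simp only [keyB_eq]
  induction l with
  | nil => rfl
  | cons r t ih =>
    cases hv : pvValid r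
    · simpa [List.filter, hv, pvPairs] using ih
    · by_cases hk : pvKeyOf r = k
      · simpa [List.filter, hv, hk, pvPairs] using ih
      · have hne : (pvKeyOf r == k) = false := by simp [hk]
        simpa [List.filter, hv, hne, pvPairs] using ih

-- B's loop over records is the seen-key loop over the valid keys in order
lemma foldB_eq {G : String × String → List (List (String × String))}
    (l : List (List (String × String)))
    (acc : List ((String × String) × List (List (String × String)))) :
    l.foldl (fun idx r =>
        match pvKeyB r with
        | none => idx
        | some k => if (idx.map (·.1)).contains k then idx else idx ++ [(k, G k)]) acc
    = ((pvPairs l).map (·.1)).foldl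
        (fun idx k => if (idx.map (·.1)).contains k then idx else idx ++ [(k, G k)]) acc := by
  simp only [keyB_eq]
  induction l generalizing acc with
  | nil => rfl
  | cons r t ih =>
    cases hv : pvValid r <;> simp [pvPairs, List.filter, hv, ih]

-- the seen-key loop realises ordered dedup, one group per first-seen key
lemma foldK_eq {G : String × String → List (List (String × String))}
    (ks : List (String × String)) (s : List (String × String)) :
    ks.foldl (fun idx k => if (idx.map (·.1)).contains k then idx else idx ++ [(k, G k)])
      (s.map (fun k => (k, G k)))
    = (PySem.Set.update s ks).map (fun k => (k, G k)) := by
  induction ks generalizing s with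
  | nil => rfl
  | cons k t ih =>
    have hfst : (s.map (fun k => (k, G k))).map (·.1) = s := by
      simp [List.map_map, Function.comp_def]
    by_cases hc : k ∈ s
    · have hcb : s.contains k = true := by simpa using hc
      have hadd : PySem.Set.add s k = s := by simp [PySem.Set.add, PySem.Set.contains, hc]
      simpa [List.foldl, hfst, PySem.Set.contains, hc, hcb, PySem.Set.update, hadd] using ih s
    · have hcb : s.contains k = false := by simpa using hc
      have hadd : PySem.Set.add s k = s ++ [k] := by
        simp [PySem.Set.add, PySem.Set.contains, hc]
      have := ih (s ++ [k])
      simpa [List.foldl, hfst, PySem.Set.contains, hc, hcb, PySem.Set.update, hadd] using this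

-- ===== VERDICT (by name: the statement is the Claim_ definition above) =====
theorem index_marcelo_py_spec : Claim_equal_index_marcelo_py := by
  intro l _
  show index_marcelo_py l = index_marcelo_py_alt l
  rw [A_char]
  simp only [index_marcelo_py_alt]
  rw [foldB_eq]
  have := foldK_eq (G := fun k => l.filter (fun x => pvKeyB x == some k))
    ((pvPairs l).map (·.1)) []
  simp only [List.map_nil] at this
  rw [this]
  simp only [PySem.List.dedup, PySem.Set.ofList, PySem.Set.update, PySem.Set.empty, List.map_map]
  apply List.map_congr_left
  intro k _
  simp [group_eq]
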